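-- pv_equiv track=rewrite | github.com/stefoxp/codewars | StringTops_6kyu.py | tops
-- ===== SOURCE A (Python) =====
-- def tops(msg):
--     result = ""
--     i = 0
--
--     for increment in range(1, len(msg), 4):
--         i += increment
--
--         if i < len(msg):
--             result = msg[i] + result
--         else:
--             return result
--
--     return result
-- ===== SOURCE B (Python) =====
-- def tops(msg):
--     def go(k):
--         idx = (k + 1) * (2 * k + 1)
--         if idx >= len(msg):
--             return ""
--         return go(k + 1) + msg[idx]
--     return go(0)
-- ===== Notes on version B (the rewrite author's own statement) =====
-- stated objective: simpler
-- what changed: B is a state-free recursion on the index k with the closed-form position (k+1)*(2k+1): each recursive call descends first and appends its character on the way back up, so the reversed order falls out of the call stack, replacing A's iterative range(1,len,4) loop with mutable accumulator i, early return and repeated string prepending.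
import Mathlib
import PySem

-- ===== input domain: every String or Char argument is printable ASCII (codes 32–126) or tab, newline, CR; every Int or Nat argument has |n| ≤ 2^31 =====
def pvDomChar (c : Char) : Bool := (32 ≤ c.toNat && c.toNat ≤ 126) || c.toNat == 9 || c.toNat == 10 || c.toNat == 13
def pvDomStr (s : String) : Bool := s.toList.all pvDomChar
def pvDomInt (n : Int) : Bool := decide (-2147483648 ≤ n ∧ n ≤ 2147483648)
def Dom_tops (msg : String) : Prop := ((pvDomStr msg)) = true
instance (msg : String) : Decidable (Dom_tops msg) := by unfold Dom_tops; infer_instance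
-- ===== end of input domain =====

-- B replaces A's iterative range loop with mutable accumulator i and string prepending by a
-- state-free recursion on k using the closed-form index (k+1)*(2k+1), appending each character
-- on the way back up the call stack (objective: simpler).

-- ===== PORT A =====
-- A's for-loop over range(1, len(msg), 4) with state (result, i); early return on i >= len.
def topsLoopA (cs : List Char) (incs : List Int) (result : List Char) (i : Int) : List Char :=
  match incs with
  | [] => result
  | inc :: rest =>
    if i + inc < (cs.length : Int) then
      topsLoopA cs rest (PySem.List.pyGetD cs (i + inc) ' ' :: result) (i + inc)
    else result

def tops (msg : String) : String :=
  String.ofList (topsLoopA msg.toList (PySem.List.pyRange 1 (msg.length : Int) 4) [] 0)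

-- ===== PORT B =====
-- B's recursion go(k): base case when (k+1)*(2k+1) is out of range, else go(k+1) + msg[idx].
def topsAltGo (cs : List Char) (k : Nat) : List Char :=
  if h : (k + 1) * (2 * k + 1) < cs.length then
    topsAltGo cs (k + 1) ++ [cs[(k + 1) * (2 * k + 1)]]
  else []
termination_by cs.length - k
decreasing_by
  have hk : k < (k + 1) * (2 * k + 1) := by nlinarith
  omega

def tops_alt (msg : String) : String :=
  String.ofList (topsAltGo msg.toList 0)

-- ===== PRECONDITION & SPEC =====
def Spec_tops (msg : String) (out : String) : Prop := out = tops_alt msg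
instance (msg : String) (out : String) : Decidable (Spec_tops msg out) := by unfold Spec_tops; infer_instance

-- ===== CLAIM (what is proved, stated in full; the proofs are below) =====
def Claim_equal_tops : Prop := ∀ (msg : String), Dom_tops msg → Spec_tops msg (tops msg)

-- ===== LEMMAS AND PROOFS =====

-- cons-unfolding of pyRange for step 4
theorem pyRange_four_cons (a b : Int) (h : a < b) :
    PySem.List.pyRange a b 4 = a :: PySem.List.pyRange (a + 4) b 4 := by
  rw [PySem.List.pyRange_of_pos a b (by norm_num),
      PySem.List.pyRange_of_pos (a + 4) b (by norm_num)]
  have hn : (if a < b then ((b - a + 4 - 1) / 4).toNat else 0)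
      = (if a + 4 < b then ((b - (a + 4) + 4 - 1) / 4).toNat else 0) + 1 := by
    split_ifs with h2 <;> omega
  rw [hn, List.range_succ_eq_map, List.map_cons, List.map_map]
  refine congrArg₂ List.cons (by norm_num) (List.map_congr_left ?_)
  intro k _
  simp only [Function.comp_apply]
  push_cast
  ring

-- empty pyRange for step 4
theorem pyRange_four_nil (a b : Int) (h : ¬ a < b) :
    PySem.List.pyRange a b 4 = [] := by
  rw [PySem.List.pyRange_of_pos a b (by norm_num), if_neg h]
  simp

-- loop invariant: A's loop from increment 4k+1 with accumulator i = 2k^2-k equals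
-- B's recursion from index k, appended onto the accumulated result.
theorem loop_eq (cs : List Char) (k : Nat) (result : List Char) :
    topsLoopA cs (PySem.List.pyRange (4 * (k : Int) + 1) (cs.length : Int) 4) result
        (2 * (k : Int) * k - k)
      = topsAltGo cs k ++ result := by
  by_cases h1 : 4 * (k : Int) + 1 < (cs.length : Int)
  · rw [pyRange_four_cons _ _ h1]
    simp only [topsLoopA]
    have hi : 2 * (k : Int) * k - k + (4 * (k : Int) + 1) = ((k + 1) * (2 * k + 1) : Nat) := by
      push_cast; ring
    by_cases h2 : (k + 1) * (2 * k + 1) < cs.length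
    · rw [if_pos (by rw [hi]; exact_mod_cast h2)]
      rw [PySem.List.pyGetD_eq_getElem cs ' ' (by rw [hi]; positivity)
            (by rw [hi]; exact_mod_cast h2)]
      simp only [hi, Int.toNat_natCast]
      rw [show topsAltGo cs k
            = topsAltGo cs (k + 1) ++ [cs[(k + 1) * (2 * k + 1)]] from by
          rw [topsAltGo, dif_pos h2]]
      rw [List.append_assoc, List.singleton_append]
      rw [show (4 * (k : Int) + 1 + 4) = 4 * ((k + 1 : Nat) : Int) + 1 from by push_cast; ring]
      have hrec := loop_eq cs (k + 1) (cs[(k + 1) * (2 * k + 1)] :: result)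
      rw [show 2 * ((k + 1 : Nat) : Int) * ((k + 1 : Nat) : Int) - ((k + 1 : Nat) : Int)
            = ((((k + 1) * (2 * k + 1) : Nat)) : Int) from by push_cast; ring] at hrec
      exact hrec
    · rw [if_neg (by rw [hi]; exact_mod_cast h2)]
      rw [topsAltGo, dif_neg h2]
      simp
  · rw [pyRange_four_nil _ _ h1]
    have h2 : ¬ (k + 1) * (2 * k + 1) < cs.length := by
      intro hlt
      apply h1
      have key : 4 * k + 1 ≤ (k + 1) * (2 * k + 1) := by
        rcases Nat.eq_zero_or_pos k with h0 | h0
        · subst h0; simp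
        · nlinarith
      omega
    rw [topsAltGo, dif_neg h2]
    simp [topsLoopA]
termination_by cs.length - k
decreasing_by
  have hk : k < (k + 1) * (2 * k + 1) := by nlinarith
  omega

-- ===== VERDICT (by name: the statement is the Claim_ definition above) =====
theorem tops_spec : Claim_equal_tops := by
  intro msg _
  unfold Spec_tops tops tops_alt
  have h := loop_eq msg.toList 0 []
  norm_num at h
  rw [h]
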